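-- pv_equiv track=rewrite | github.com/Nghia03092004/nghia03092004.github.io | project_euler/problem_434/solution.py | is_laman
-- ===== SOURCE A (Python) =====
-- from itertools import combinations
--
-- def is_laman(n, edges):
--     """Check if graph satisfies Laman condition: |E(S)| <= 2|S|-3 for all S."""
--     if len(edges) != 2*n - 3:
--         return False
--     vertices = set(range(n))
--     for size in range(2, n + 1):
--         for subset in combinations(vertices, size):
--             s = set(subset)
--             count = sum(1 for u, v in edges if u in s and v in s)
--             if count > 2 * size - 3:
--                 return False
--     return True
-- ===== SOURCE B (Python) =====
-- def is_laman(n, edges):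
--     """Check if graph satisfies Laman condition: |E(S)| <= 2|S|-3 for all S."""
--     if len(edges) != 2 * n - 3:
--         return False
--
--     def ok(v, members):
--         # decide membership of vertices v..n-1; members holds chosen ones among 0..v-1
--         if v == n:
--             k = len(members)
--             if k < 2:
--                 return True
--             count = sum(1 for u, w in edges if u in members and w in members)
--             return count <= 2 * k - 3
--         return ok(v + 1, members) and ok(v + 1, members + [v])
--
--     return ok(0, [])
-- ===== Notes on version B (the rewrite author's own statement) =====
-- stated objective: alternative
-- what changed: B replaces the size-stratified double loop over itertools.combinations by a single in/out recursion over the vertices that enumerates every subset once and checks the sparsity bound at the leaves.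
import Mathlib
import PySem

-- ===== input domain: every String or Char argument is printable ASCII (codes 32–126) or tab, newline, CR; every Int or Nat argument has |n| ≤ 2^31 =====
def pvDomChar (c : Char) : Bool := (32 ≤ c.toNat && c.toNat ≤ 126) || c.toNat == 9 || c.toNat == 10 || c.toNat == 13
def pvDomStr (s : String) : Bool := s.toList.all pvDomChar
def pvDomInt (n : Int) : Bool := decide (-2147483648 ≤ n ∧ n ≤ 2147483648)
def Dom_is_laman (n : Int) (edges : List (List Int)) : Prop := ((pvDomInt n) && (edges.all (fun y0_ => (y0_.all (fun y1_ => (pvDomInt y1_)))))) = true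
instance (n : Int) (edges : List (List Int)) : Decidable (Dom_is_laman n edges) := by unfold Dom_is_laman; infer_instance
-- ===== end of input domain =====

-- B enumerates all vertex subsets by one in/out recursion instead of A's size-by-size
-- itertools.combinations double loop; an alternative of the same exponential cost.


-- ===== PORT A =====
-- itertools.combinations(vertices, k): the k-element subsets in lexicographic order
-- (set(range(n)) iterates 0..n-1; only membership of the result list is used).
def pvCombos : List Int → Nat → List (List Int)
  | _, 0 => [[]]
  | [], _ + 1 => []
  | x :: xs, k + 1 => (pvCombos xs k).map (fun t => x :: t) ++ pvCombos xs (k + 1)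

-- s = set(subset) has exactly the elements of the (duplicate-free) tuple, so `u in s`
-- is ported as list membership.  An edge of arity ≠ 2 raises ValueError in Python at the
-- tuple unpack `for u, v in edges`; those inputs are outside Pre_ (the `| _ =>` arm).
def is_laman (n : Int) (edges : List (List Int)) : Bool :=
  if (edges.length : Int) = 2 * n - 3 then
    (PySem.List.pyRange 2 (n + 1) 1).all (fun size =>
      (pvCombos (PySem.List.pyRange 0 n 1) size.toNat).all (fun s =>
        decide (edges.foldl (fun acc e =>
          match e with
          | [u, v] => if u ∈ s ∧ v ∈ s then acc + 1 else acc
          | _ => acc) (0 : Int) ≤ 2 * size - 3)))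
  else false

-- ===== PORT B =====
-- leaf check of Source B's `ok` (v == n): subsets of fewer than 2 vertices pass, otherwise
-- count the induced edges.  The unpack `for u, w in edges` is ported as a length-2 guard
-- with positional gets (an edge of other arity raises ValueError in Python: outside Pre_).
def altBase (edges : List (List Int)) (members : List Int) : Bool :=
  if members.length < 2 then true
  else
    decide (edges.foldl (fun acc e =>
      if e.length = 2 then
        if e.getD 0 0 ∈ members ∧ e.getD 1 0 ∈ members then acc + 1 else acc
      else acc) (0 : Int) ≤ 2 * (members.length : Int) - 3)

-- Source B's `ok(v, members)`; the recursion depth n - v is carried as explicit fuel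
-- (is_laman_alt calls it with fuel = n.toNat, so the fuel-0 arm is never reached there).
def altOk (edges : List (List Int)) (n : Int) : Int → List Int → Nat → Bool
  | v, members, fuel =>
    if v = n then altBase edges members
    else
      match fuel with
      | 0 => true
      | fuel' + 1 =>
          altOk edges n (v + 1) members fuel' && altOk edges n (v + 1) (members ++ [v]) fuel'

def is_laman_alt (n : Int) (edges : List (List Int)) : Bool :=
  if (edges.length : Int) = 2 * n - 3 then altOk edges n 0 [] n.toNat else false

-- ===== PRECONDITION & SPEC =====
-- Pre_ excludes exactly the inputs on which A raises ValueError: when the edge-count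
-- check passes, the tuple unpack `for u, v in edges` reaches an edge whose arity is not 2.
def Pre_is_laman (n : Int) (edges : List (List Int)) : Prop :=
  (edges.length : Int) = 2 * n - 3 → ∀ e ∈ edges, e.length = 2
instance (n : Int) (edges : List (List Int)) : Decidable (Pre_is_laman n edges) := by
  unfold Pre_is_laman; infer_instance

def pvWitness_is_laman : Int × List (List Int) := (2, [[0, 1]])

def Spec_is_laman (n : Int) (edges : List (List Int)) (out : Bool) : Prop := out = is_laman_alt n edges
instance (n : Int) (edges : List (List Int)) (out : Bool) : Decidable (Spec_is_laman n edges out) := by unfold Spec_is_laman; infer_instance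

-- ===== CLAIM (what is proved, stated in full; the proofs are below) =====
def Claim_equal_is_laman : Prop := ∀ (n : Int) (edges : List (List Int)), Dom_is_laman n edges → Pre_is_laman n edges → Spec_is_laman n edges (is_laman n edges)

-- ===== LEMMAS AND PROOFS =====

-- the two ports' edge counts agree: the A port unpacks by a match, the B port by a
-- length guard with positional gets.
lemma pvCount_eq (edges : List (List Int)) (s : List Int) :
    edges.foldl (fun acc e =>
      if e.length = 2 then
        if e.getD 0 0 ∈ s ∧ e.getD 1 0 ∈ s then acc + 1 else acc
      else acc) (0 : Int)
      = edges.foldl (fun acc e =>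
        match e with
        | [u, v] => if u ∈ s ∧ v ∈ s then acc + 1 else acc
        | _ => acc) (0 : Int) := by
  congr 1
  funext acc e
  rcases e with _ | ⟨u, _ | ⟨w, _ | ⟨x, t⟩⟩⟩ <;> simp [List.getD]

-- pvCombos l k lists exactly the length-k sublists of l.
lemma mem_pvCombos (l : List Int) : ∀ (k : Nat) (s : List Int),
    s ∈ pvCombos l k ↔ s.Sublist l ∧ s.length = k := by
  induction l with
  | nil =>
      intro k s
      cases k with
      | zero => simp [pvCombos, List.sublist_nil]
      | succ k =>
          simp [pvCombos, List.sublist_nil]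
          rintro rfl
          simp
  | cons x xs ih =>
      intro k s
      cases k with
      | zero =>
          simp [pvCombos, List.length_eq_zero_iff]
          rintro rfl
          exact List.nil_sublist _
      | succ k =>
          simp only [pvCombos, List.mem_append, List.mem_map, ih]
          constructor
          · rintro (⟨t, ⟨hsub, hlen⟩, rfl⟩ | ⟨hsub, hlen⟩)
            · exact ⟨List.cons_sublist_cons.mpr hsub, by simp [hlen]⟩
            · exact ⟨hsub.trans (List.sublist_cons_self x xs), hlen⟩
          · rintro ⟨hsub, hlen⟩
            rcases List.sublist_cons_iff.mp hsub with h | ⟨r, rfl, hr⟩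
            · exact Or.inr ⟨h, hlen⟩
            · exact Or.inl ⟨r, ⟨hr, by simpa using hlen⟩, rfl⟩

-- altOk with fuel n - v accepts iff every sublist of [v..n) extends members acceptably.
lemma altOk_iff (edges : List (List Int)) (n : Int) :
    ∀ (fuel : Nat) (v : Int) (members : List Int), v ≤ n → (n - v).toNat = fuel →
      (altOk edges n v members fuel = true ↔
        ∀ ext : List Int, ext.Sublist (PySem.List.pyRange v n 1) →
          altBase edges (members ++ ext) = true) := by
  intro fuel
  induction fuel with
  | zero =>
      intro v members hv hf
      have hvn : v = n := by omega
      subst hvn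
      rw [altOk]
      simp [PySem.List.pyRange_one_eq_nil (le_refl v), List.sublist_nil]
  | succ fuel ih =>
      intro v members hv hf
      have hlt : v < n := by omega
      rw [altOk]
      simp only [if_neg (by omega : ¬ v = n)]
      rw [Bool.and_eq_true,
        ih (v + 1) members (by omega) (by omega),
        ih (v + 1) (members ++ [v]) (by omega) (by omega),
        PySem.List.pyRange_one_cons hlt]
      constructor
      · rintro ⟨h1, h2⟩ ext hext
        rcases List.sublist_cons_iff.mp hext with h | ⟨r, rfl, hr⟩
        · exact h1 ext h
        · simpa [List.append_assoc] using h2 r hr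
      · intro h
        refine ⟨fun ext hext => h ext (hext.trans (List.sublist_cons_self _ _)), ?_⟩
        intro ext hext
        simpa [List.append_assoc] using h (v :: ext) (List.cons_sublist_cons.mpr hext)

-- A's double .all over sizes and combinations says exactly: every sublist of [0..n)
-- passes the leaf check.
lemma Aside_iff (edges : List (List Int)) (n : Int) (hn : 2 ≤ n) :
    ((PySem.List.pyRange 2 (n + 1) 1).all (fun size =>
      (pvCombos (PySem.List.pyRange 0 n 1) size.toNat).all (fun s =>
        decide (edges.foldl (fun acc e =>
          match e with
          | [u, v] => if u ∈ s ∧ v ∈ s then acc + 1 else acc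
          | _ => acc) (0 : Int) ≤ 2 * size - 3))) = true)
      ↔ ∀ s : List Int, s.Sublist (PySem.List.pyRange 0 n 1) → altBase edges s = true := by
  simp only [List.all_eq_true, PySem.List.mem_pyRange_one, decide_eq_true_eq]
  constructor
  · intro h s hs
    unfold altBase
    split
    · rfl
    · rename_i hlen
      rw [pvCount_eq]
      have hle : s.length ≤ (PySem.List.pyRange 0 n 1).length := hs.length_le
      rw [PySem.List.length_pyRange_one] at hle
      have hsub := (mem_pvCombos (PySem.List.pyRange 0 n 1) s.length s).mpr ⟨hs, rfl⟩
      have hcond := h (s.length : Int) ⟨by omega, by omega⟩ s (by simpa using hsub)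
      simpa using hcond
  · intro h size hsize s hs
    rcases (mem_pvCombos (PySem.List.pyRange 0 n 1) size.toNat s).mp hs with ⟨hsub, hlen⟩
    have hb := h s hsub
    unfold altBase at hb
    rw [pvCount_eq] at hb
    have hlen2 : (s.length : Int) = size := by omega
    split at hb
    · omega
    · rw [decide_eq_true_eq, hlen2] at hb
      exact hb

-- ===== VERDICT (by name: the statement is the Claim_ definition above) =====
theorem is_laman_spec : Claim_equal_is_laman := by
  intro n edges _ _
  unfold Spec_is_laman is_laman is_laman_alt
  split
  · rename_i h
    have hn : 2 ≤ n := by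
      have : (0 : Int) ≤ (edges.length : Int) := Int.natCast_nonneg _
      omega
    rw [Bool.eq_iff_iff, Aside_iff edges n hn,
      altOk_iff edges n n.toNat 0 [] (by omega) (by omega)]
    simp
  · rfl
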